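-- pv_equiv track=rewrite | github.com/Shenglei-Mao/opcc | site2.py | validate_two_trans
-- ===== SOURCE A (Python) =====
-- def validate_two_trans(cur_trans, prev_trans):
--     cur_read_set = set(cur_trans[2])
--     prev_write_set = set()
--     for item in prev_trans[3]:
--         prev_write_set.add(item[0])
--     if cur_read_set.intersection(prev_write_set):
--         return False
--     return True
-- ===== SOURCE B (Python) =====
-- def validate_two_trans(cur_trans, prev_trans):
--     reads = sorted(cur_trans[2])
--     writes = sorted(item[0] for item in prev_trans[3])
--     i = j = 0
--     while i < len(reads) and j < len(writes):
--         if reads[i] < writes[j]: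
--             i += 1
--         elif writes[j] < reads[i]:
--             j += 1
--         else:
--             return False
--     return True
-- ===== Notes on version B (the rewrite author's own statement) =====
-- stated objective: alternative
-- what changed: B sorts the read keys and the previous write keys and detects a conflict with a sorted two-pointer merge scan, instead of building two hash sets and intersecting them.
import Mathlib
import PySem

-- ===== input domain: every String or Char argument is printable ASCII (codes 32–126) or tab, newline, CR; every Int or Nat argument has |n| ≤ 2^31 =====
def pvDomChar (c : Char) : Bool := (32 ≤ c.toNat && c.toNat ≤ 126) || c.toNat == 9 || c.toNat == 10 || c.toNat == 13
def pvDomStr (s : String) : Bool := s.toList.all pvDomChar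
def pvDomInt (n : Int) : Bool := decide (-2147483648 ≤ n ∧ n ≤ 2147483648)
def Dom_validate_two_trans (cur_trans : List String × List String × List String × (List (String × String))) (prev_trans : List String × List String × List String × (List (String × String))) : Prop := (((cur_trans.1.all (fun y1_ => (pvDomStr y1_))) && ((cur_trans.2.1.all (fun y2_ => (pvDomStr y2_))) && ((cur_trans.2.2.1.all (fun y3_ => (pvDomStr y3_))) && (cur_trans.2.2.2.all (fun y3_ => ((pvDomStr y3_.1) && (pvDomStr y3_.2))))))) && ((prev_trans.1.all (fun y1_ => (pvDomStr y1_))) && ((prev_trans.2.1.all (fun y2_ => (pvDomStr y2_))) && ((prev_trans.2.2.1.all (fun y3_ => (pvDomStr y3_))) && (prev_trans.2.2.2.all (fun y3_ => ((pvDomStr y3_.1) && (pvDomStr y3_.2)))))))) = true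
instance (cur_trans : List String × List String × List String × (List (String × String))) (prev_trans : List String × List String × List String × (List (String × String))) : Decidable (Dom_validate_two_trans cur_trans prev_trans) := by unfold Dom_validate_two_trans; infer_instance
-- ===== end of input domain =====

-- ===== PORT A =====
-- B replaces A's build-two-hash-sets-and-intersect by sorting the read keys and the
-- previous write keys and running a two-pointer merge scan; objective: alternative.
def validate_two_trans (cur_trans : List String × List String × List String × (List (String × String))) (prev_trans : List String × List String × List String × (List (String × String))) : Bool :=
  let cur_read_set := PySem.Set.ofList cur_trans.2.2.1
  let prev_write_set := prev_trans.2.2.2.foldl (fun s item => PySem.Set.add s item.1) PySem.Set.empty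
  if !(PySem.Set.inter cur_read_set prev_write_set).isEmpty then false else true

-- ===== PORT B =====
-- the two-pointer `while` loop of Source B: advance past the smaller head, stop on a tie
def pvMergeScan : List String → List String → Bool
  | [], _ => true
  | _ :: _, [] => true
  | a :: as, b :: bs =>
    if a < b then pvMergeScan as (b :: bs)
    else if b < a then pvMergeScan (a :: as) bs
    else false
termination_by xs ys => xs.length + ys.length

def validate_two_trans_alt (cur_trans : List String × List String × List String × (List (String × String))) (prev_trans : List String × List String × List String × (List (String × String))) : Bool :=
  let reads := PySem.List.sorted cur_trans.2.2.1 (fun x => x) false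
  let writes := PySem.List.sorted (prev_trans.2.2.2.map (fun item => item.1)) (fun x => x) false
  pvMergeScan reads writes

-- ===== PRECONDITION & SPEC =====
def Spec_validate_two_trans (cur_trans : List String × List String × List String × (List (String × String))) (prev_trans : List String × List String × List String × (List (String × String))) (out : Bool) : Prop := out = validate_two_trans_alt cur_trans prev_trans
instance (cur_trans : List String × List String × List String × (List (String × String))) (prev_trans : List String × List String × List String × (List (String × String))) (out : Bool) : Decidable (Spec_validate_two_trans cur_trans prev_trans out) := by unfold Spec_validate_two_trans; infer_instance

-- ===== CLAIM =====
def Claim_equal_validate_two_trans : Prop := ∀ (cur_trans : List String × List String × List String × (List (String × String))) (prev_trans : List String × List String × List String × (List (String × String))), Dom_validate_two_trans cur_trans prev_trans → Spec_validate_two_trans cur_trans prev_trans (validate_two_trans cur_trans prev_trans)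

-- ===== LEMMAS AND PROOFS =====

-- on sorted lists, the merge scan returns true iff the lists are disjoint
theorem pvMergeScan_eq_true_iff (xs ys : List String)
    (hx : xs.Pairwise (· ≤ ·)) (hy : ys.Pairwise (· ≤ ·)) :
    pvMergeScan xs ys = true ↔ ∀ a ∈ xs, a ∉ ys := by
  fun_induction pvMergeScan xs ys with
  | case1 ys => simp
  | case2 x xs => simp
  | case3 a as b bs hab ih =>
    have hd := List.pairwise_cons.mp hy
    have ih' := ih hx.of_cons hy
    simp only [ih']
    constructor
    · intro h x hx'
      rcases List.mem_cons.mp hx' with rfl | hm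
      · simp only [List.mem_cons, not_or]
        exact ⟨ne_of_lt hab, fun hc => absurd (lt_of_lt_of_le hab (hd.1 _ hc)) (by simp)⟩
      · exact h x hm
    · intro h x hm; exact h x (List.mem_cons_of_mem _ hm)
  | case4 a as b bs hab hba ih =>
    have hd := List.pairwise_cons.mp hx
    have ih' := ih hx hy.of_cons
    simp only [ih']
    constructor
    · intro h x hx' hc
      rcases List.mem_cons.mp hc with rfl | hm
      · rcases List.mem_cons.mp hx' with rfl | hm'
        · exact absurd hba (by simp)
        · exact absurd (lt_of_lt_of_le hba (hd.1 _ hm')) (by simp)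
      · exact h x hx' hm
    · intro h x hx' hc; exact h x hx' (List.mem_cons_of_mem _ hc)
  | case5 a as b bs hab hba =>
    have : a = b := le_antisymm (not_lt.mp hba) (not_lt.mp hab)
    subst this
    simp

theorem ports_agree (cur_trans prev_trans : List String × List String × List String × (List (String × String))) :
    validate_two_trans cur_trans prev_trans = validate_two_trans_alt cur_trans prev_trans := by
  simp only [validate_two_trans, validate_two_trans_alt]
  have hw : prev_trans.2.2.2.foldl (fun s item => PySem.Set.add s item.1) PySem.Set.empty
      = PySem.Set.ofList (prev_trans.2.2.2.map (fun item => item.1)) := by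
    rw [← PySem.Set.update_map_eq_foldl_add]
    simp [PySem.Set.empty, PySem.Set.update_nil_left]
  rw [hw]
  have hdisj : (∀ a ∈ PySem.List.sorted cur_trans.2.2.1 (fun x => x) false,
        a ∉ PySem.List.sorted (prev_trans.2.2.2.map (fun item => item.1)) (fun x => x) false)
      ↔ ∀ a ∈ cur_trans.2.2.1, a ∉ prev_trans.2.2.2.map (fun item => item.1) := by
    constructor <;> intro h a ha hc
    · exact h a (by rwa [PySem.List.mem_sorted]) (by rwa [PySem.List.mem_sorted])
    · exact h a (by rwa [PySem.List.mem_sorted] at ha) (by rwa [PySem.List.mem_sorted] at hc)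
  have hscan := pvMergeScan_eq_true_iff
      (PySem.List.sorted cur_trans.2.2.1 (fun x => x) false)
      (PySem.List.sorted (prev_trans.2.2.2.map (fun item => item.1)) (fun x => x) false)
      (PySem.List.sorted_pairwise _ _) (PySem.List.sorted_pairwise _ _)
  by_cases hempty : (PySem.Set.inter (PySem.Set.ofList cur_trans.2.2.1)
      (PySem.Set.ofList (prev_trans.2.2.2.map (fun item => item.1)))) = []
  · have hnone : ∀ a ∈ cur_trans.2.2.1, a ∉ prev_trans.2.2.2.map (fun item => item.1) := by
      intro a ha hc
      have : a ∈ PySem.Set.inter (PySem.Set.ofList cur_trans.2.2.1)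
          (PySem.Set.ofList (prev_trans.2.2.2.map (fun item => item.1))) := by
        rw [PySem.Set.mem_inter, PySem.Set.mem_ofList, PySem.Set.mem_ofList]
        exact ⟨ha, hc⟩
      rw [hempty] at this
      exact absurd this (List.not_mem_nil)
    rw [hscan.mpr (hdisj.mpr hnone)]
    simp [hempty]
  · rcases List.exists_mem_of_ne_nil _ hempty with ⟨x, hx⟩
    rw [PySem.Set.mem_inter, PySem.Set.mem_ofList, PySem.Set.mem_ofList] at hx
    have hfalse : pvMergeScan (PySem.List.sorted cur_trans.2.2.1 (fun x => x) false)
        (PySem.List.sorted (prev_trans.2.2.2.map (fun item => item.1)) (fun x => x) false) = false := by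
      rw [Bool.eq_false_iff]
      intro ht
      exact (hdisj.mp (hscan.mp ht)) x hx.1 hx.2
    rw [hfalse]
    simp [hempty]

-- ===== VERDICT =====
theorem validate_two_trans_spec : Claim_equal_validate_two_trans := by
  intro c p _
  unfold Spec_validate_two_trans
  exact ports_agree c p
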